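-- pv_equiv track=rewrite | github.com/Yookaser/Algorithm | SWEA/D3/swea1221.py | gns
-- ===== SOURCE A (Python) =====
-- def gns(arr):
--     result = []
--     # 딕셔너리 item 0으로 초기화
--     other_number = {"ZRO": 0, "ONE": 0, "TWO": 0, "THR": 0, "FOR": 0, "FIV": 0, "SIX": 0, "SVN": 0, "EGT": 0, "NIN": 0}
--
--     for i in arr: # arr의 요소와 같은 해당 key의 item +1
--         other_number[i] += 1
--
--     for i in ["ZRO", "ONE", "TWO", "THR", "FOR", "FIV", "SIX", "SVN", "EGT", "NIN"]: # 순서대로 리스트 반복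
--         result.extend([i]*other_number[i]) # 딕셔너리의 item 값 만큼 리스트인 i를 곱하여 정렬된 리스트 생성
--
--     return result
-- ===== SOURCE B (Python) =====
-- def gns(arr):
--     rank = {"ZRO": 0, "ONE": 1, "TWO": 2, "THR": 3, "FOR": 4,
--             "FIV": 5, "SIX": 6, "SVN": 7, "EGT": 8, "NIN": 9}
--     return sorted(arr, key=lambda x: rank[x])
-- ===== Notes on version B (the rewrite author's own statement) =====
-- stated objective: idiomatic
-- what changed: Replaces the count-into-buckets-then-rebuild counting sort with a single comparison sort: a fixed rank dict maps each word token to 0..9 and the result is sorted(arr, key=lambda x: rank[x]).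
import Mathlib
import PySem

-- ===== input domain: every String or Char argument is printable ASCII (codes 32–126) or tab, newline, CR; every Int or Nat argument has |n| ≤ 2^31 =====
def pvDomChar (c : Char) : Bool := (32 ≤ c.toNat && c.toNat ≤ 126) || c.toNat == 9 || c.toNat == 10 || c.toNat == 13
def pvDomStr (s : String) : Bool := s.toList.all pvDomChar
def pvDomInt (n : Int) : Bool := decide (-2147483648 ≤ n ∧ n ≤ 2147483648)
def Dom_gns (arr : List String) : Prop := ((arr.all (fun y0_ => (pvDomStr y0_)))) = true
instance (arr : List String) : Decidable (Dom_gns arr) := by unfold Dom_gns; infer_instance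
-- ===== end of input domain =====

-- B replaces A's count-buckets-then-rebuild counting sort by a single stable
-- comparison sort keyed by a fixed token-rank dictionary (idiomatic, not faster).


-- ===== PORT A =====
def gnsWords : List String :=
  ["ZRO", "ONE", "TWO", "THR", "FOR", "FIV", "SIX", "SVN", "EGT", "NIN"]

-- A's dict literal initialised to 0 for the ten keys
def gnsInit : PySem.Dict String Int :=
  PySem.Dict.ofList [("ZRO", 0), ("ONE", 0), ("TWO", 0), ("THR", 0), ("FOR", 0),
                     ("FIV", 0), ("SIX", 0), ("SVN", 0), ("EGT", 0), ("NIN", 0)]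

def gns (arr : List String) : List String :=
  -- other_number[i] += 1 : under Pre_ every i is one of the ten pre-initialised
  -- keys, so the lookup never raises and modify (default 0) is exact there
  let other := arr.foldl (fun d i => d.modify i 0 (· + 1)) gnsInit
  -- result.extend([i] * other_number[i]) over the fixed word list; every i is a
  -- key of `other`, so getD is the exact lookup
  gnsWords.foldl (fun result i => result ++ PySem.List.pyRepeat [i] (other.getD i 0)) []

-- ===== PORT B =====
def gnsRank : PySem.Dict String Int :=
  PySem.Dict.ofList [("ZRO", 0), ("ONE", 1), ("TWO", 2), ("THR", 3), ("FOR", 4),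
                     ("FIV", 5), ("SIX", 6), ("SVN", 7), ("EGT", 8), ("NIN", 9)]

def gns_alt (arr : List String) : List String :=
  -- sorted(arr, key=lambda x: rank[x]); under Pre_ every key is present, so getD is exact
  PySem.List.sorted arr (fun x => gnsRank.getD x 0) false

-- ===== PRECONDITION & SPEC =====
-- Pre_ excludes lists containing a token other than the ten word tokens: there
-- both A (other_number[i] += 1) and B (rank[x]) raise KeyError.
def Pre_gns (arr : List String) : Prop := ∀ s ∈ arr, s ∈ gnsWords
instance (arr : List String) : Decidable (Pre_gns arr) := by unfold Pre_gns; infer_instance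

def pvWitness_gns : List String := ["NIN", "ZRO", "ONE", "ZRO", "FIV"]

def Spec_gns (arr : List String) (out : List String) : Prop := out = gns_alt arr
instance (arr : List String) (out : List String) : Decidable (Spec_gns arr out) := by unfold Spec_gns; infer_instance

-- ===== CLAIM (what is proved, stated in full; the proofs are below) =====
def Claim_equal_gns : Prop := ∀ (arr : List String), Dom_gns arr → Pre_gns arr → Spec_gns arr (gns arr)

-- ===== LEMMAS AND PROOFS =====

-- the common normal form both ports are reduced to: each word in rank order,
-- repeated as often as it occurs in arr
def gnsTarget (arr : List String) : List String :=
  gnsWords.flatMap (fun w => List.replicate (arr.count w) w)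

lemma gns_eq_target (arr : List String) : gns arr = gnsTarget arr := by
  show gnsWords.foldl (fun result i => result ++ PySem.List.pyRepeat [i]
      ((arr.foldl (fun d i => d.modify i 0 (· + 1)) gnsInit).getD i 0)) [] = gnsTarget arr
  rw [PySem.List.foldl_append_eq_flatMap]
  rw [List.nil_append]
  apply List.flatMap_congr
  intro w hw
  rw [PySem.Dict.getD_foldl_modify_add_one]
  have h0 : gnsInit.getD w 0 = 0 := by
    fin_cases hw <;> decide
  rw [h0, PySem.List.pyRepeat_singleton]
  simp

-- uniqueness of a key-sorted arrangement when the key separates the members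
lemma sorted_arrangement_unique (k : String → Int) :
    ∀ (l₁ l₂ : List String), l₁.Perm l₂ →
      l₁.Pairwise (fun a b => k a ≤ k b) → l₂.Pairwise (fun a b => k a ≤ k b) →
      (∀ x ∈ l₁, ∀ y ∈ l₁, k x = k y → x = y) → l₁ = l₂ := by
  intro l₁
  induction l₁ with
  | nil => intro l₂ hp _ _ _; exact (hp.nil_eq).symm ▸ rfl
  | cons a t₁ ih =>
    intro l₂ hp h₁ h₂ hinj
    cases l₂ with
    | nil => exact absurd hp.symm (by simp)
    | cons b t₂ =>
      have hb₁ : b ∈ a :: t₁ := hp.mem_iff.mpr (List.mem_cons_self ..)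
      have ha₂ : a ∈ b :: t₂ := hp.mem_iff.mp (List.mem_cons_self ..)
      have hab : k a ≤ k b := by
        rcases List.mem_cons.mp hb₁ with h | h
        · rw [h]
        · exact (List.pairwise_cons.mp h₁).1 b h
      have hba : k b ≤ k a := by
        rcases List.mem_cons.mp ha₂ with h | h
        · rw [h]
        · exact (List.pairwise_cons.mp h₂).1 a h
      have heq : a = b := hinj a (List.mem_cons_self ..) b hb₁ (le_antisymm hab hba)
      subst heq
      have ht : t₁.Perm t₂ := hp.cons_inv
      have := ih t₂ ht (List.pairwise_cons.mp h₁).2 (List.pairwise_cons.mp h₂).2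
        (fun x hx y hy => hinj x (List.mem_cons_of_mem _ hx) y (List.mem_cons_of_mem _ hy))
      rw [this]

lemma target_perm (arr : List String) (hpre : ∀ s ∈ arr, s ∈ gnsWords) :
    (gnsTarget arr).Perm arr := by
  rw [List.perm_iff_count]
  intro a
  by_cases ha : a ∈ gnsWords
  · fin_cases ha <;> simp [gnsTarget, gnsWords, List.count_replicate]
  · have h0 : arr.count a = 0 := List.count_eq_zero.mpr (fun h => ha (hpre a h))
    simp only [gnsWords] at ha
    simp at ha
    simp [gnsTarget, gnsWords, List.count_replicate, h0]
    and_intros <;> (intro h; subst h; simp_all)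

lemma pairwise_flatMap_replicate (k : String → Int) (n : String → Nat) :
    ∀ (ws : List String), ws.Pairwise (fun a b => k a ≤ k b) →
      (ws.flatMap fun w => List.replicate (n w) w).Pairwise (fun a b => k a ≤ k b) := by
  intro ws
  induction ws with
  | nil => simp
  | cons w ws ih =>
    intro h
    simp only [List.flatMap_cons]
    apply List.pairwise_append.mpr
    refine ⟨?_, ih h.tail, ?_⟩
    · exact List.pairwise_replicate.mpr (Or.inr le_rfl)
    · intro x hx y hy
      rw [List.eq_of_mem_replicate hx]
      obtain ⟨w', hw', hy'⟩ := List.mem_flatMap.mp hy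
      rw [List.eq_of_mem_replicate hy']
      exact List.rel_of_pairwise_cons h hw'

lemma gns_alt_eq_target (arr : List String) (hpre : ∀ s ∈ arr, s ∈ gnsWords) :
    gns_alt arr = gnsTarget arr := by
  apply sorted_arrangement_unique (fun x => gnsRank.getD x 0)
  · exact (PySem.List.sorted_perm ..).trans (target_perm arr hpre).symm
  · exact PySem.List.sorted_pairwise ..
  · exact pairwise_flatMap_replicate _ _ gnsWords (by decide)
  · intro x hx y hy h
    have hx' : x ∈ gnsWords := hpre x ((PySem.List.mem_sorted ..).mp hx)
    have hy' : y ∈ gnsWords := hpre y ((PySem.List.mem_sorted ..).mp hy)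
    have hkey : ∀ x ∈ gnsWords, ∀ y ∈ gnsWords, gnsRank.getD x 0 = gnsRank.getD y 0 → x = y := by decide
    exact hkey x hx' y hy' h

-- ===== VERDICT (by name: the statement is the Claim_ definition above) =====
theorem gns_spec : Claim_equal_gns := by
  intro arr _ hpre
  show gns arr = gns_alt arr
  rw [gns_eq_target, gns_alt_eq_target arr hpre]
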